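-- pv_equiv track=rewrite | github.com/PRKKILLER/Algorithm_Practice | Company-OA/Robinhood/MaxRevenueFromStocks.py | solution
-- ===== SOURCE A (Python) =====
-- def solution(prices, algo, k):
--     revenue = 0
--
--     for i in range(len(prices)):
--         if algo[i] == 0:
--             revenue -= prices[i]
--         else:
--             revenue += prices[i]
--
--     revenue_list = [revenue]
--
--     for i in range(len(prices) - k + 1):
--         revenue = 0
--         for j in range(len(prices)):
--             if j >= i and j < i + k or algo[j] == 1:
--                 revenue += prices[j]
--             else:
--                 revenue -= prices[j]
--         revenue_list.append(revenue)
--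
--     return max(revenue_list)
-- ===== SOURCE B (Python) =====
-- def solution(prices, algo, k):
--     n = len(prices)
--     base = 0      # revenue with no window (algo as-is, algo[i] != 0 counted as sold)
--     base2 = 0     # window-formula baseline: + where algo[j] == 1, - elsewhere
--     pref = [0]    # prefix sums of prices[j] for j with algo[j] != 1
--     for j in range(n):
--         p, a = prices[j], algo[j]
--         base += p if a != 0 else -p
--         base2 += p if a == 1 else -p
--         pref.append(pref[-1] + (p if a != 1 else 0))
--     best = base
--     if k <= n:
--         if k <= 0:
--             best = max(best, base2)
--         else:
--             w = max(pref[i + k] - pref[i] for i in range(n - k + 1))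
--             best = max(best, base2 + 2 * w)
--     return best
-- ===== Notes on version B (the rewrite author's own statement) =====
-- stated objective: faster
-- what changed: B computes the no-window baseline, the window-formula baseline and a prefix-sum table of the algo!=1 prices in one pass, then evaluates every length-k window in O(1) as base2 + 2*(pref[i+k]-pref[i]) instead of A's full rescan of all prices per window.
import Mathlib
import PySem

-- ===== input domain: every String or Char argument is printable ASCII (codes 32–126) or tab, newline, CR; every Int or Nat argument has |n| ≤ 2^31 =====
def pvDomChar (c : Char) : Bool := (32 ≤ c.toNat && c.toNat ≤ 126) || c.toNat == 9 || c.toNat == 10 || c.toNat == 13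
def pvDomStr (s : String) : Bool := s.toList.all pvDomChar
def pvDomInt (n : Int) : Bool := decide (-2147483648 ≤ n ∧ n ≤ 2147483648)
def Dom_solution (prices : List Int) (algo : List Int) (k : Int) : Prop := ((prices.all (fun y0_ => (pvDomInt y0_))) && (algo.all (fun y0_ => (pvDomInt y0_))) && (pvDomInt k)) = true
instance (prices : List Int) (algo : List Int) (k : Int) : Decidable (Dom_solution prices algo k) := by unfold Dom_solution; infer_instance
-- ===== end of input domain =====

-- B replaces A's per-window re-scan of all prices by a single pass building a prefix-sum
-- table, so every window is evaluated in O(1) (objective: faster).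

-- ===== PORT A =====
def solution (prices : List Int) (algo : List Int) (k : Int) : Int :=
  let n : Int := (prices.length : Int)
  let revenue : Int := (PySem.List.pyRange 0 n 1).foldl
    (fun r i => if PySem.List.pyGetD algo i 0 = 0
                then r - PySem.List.pyGetD prices i 0
                else r + PySem.List.pyGetD prices i 0) 0
  let revenueList : List Int := (PySem.List.pyRange 0 (n - k + 1) 1).foldl
    (fun acc i => acc ++ [(PySem.List.pyRange 0 n 1).foldl
      (fun r j => if (i ≤ j ∧ j < i + k) ∨ PySem.List.pyGetD algo j 0 = 1
                  then r + PySem.List.pyGetD prices j 0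
                  else r - PySem.List.pyGetD prices j 0) 0]) [revenue]
  (PySem.List.max? revenueList (fun x => x)).getD 0

-- ===== PORT B =====
-- one pass: (base, window-baseline, prefix sums of prices[j] with algo[j] != 1)
def solution_alt (prices : List Int) (algo : List Int) (k : Int) : Int :=
  let n : Int := (prices.length : Int)
  let st : Int × Int × List Int := (PySem.List.pyRange 0 n 1).foldl
    (fun (st : Int × Int × List Int) j =>
      (st.1 + (if PySem.List.pyGetD algo j 0 ≠ 0 then PySem.List.pyGetD prices j 0
               else -(PySem.List.pyGetD prices j 0)),
       st.2.1 + (if PySem.List.pyGetD algo j 0 = 1 then PySem.List.pyGetD prices j 0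
                 else -(PySem.List.pyGetD prices j 0)),
       st.2.2 ++ [PySem.List.pyGetD st.2.2 (-1) 0 +
                  (if PySem.List.pyGetD algo j 0 ≠ 1 then PySem.List.pyGetD prices j 0 else 0)]))
    (0, 0, [0])
  if k ≤ n then
    if k ≤ 0 then max st.1 st.2.1
    else
      let w : Int := ((PySem.List.max? ((PySem.List.pyRange 0 (n - k + 1) 1).map
        (fun i => PySem.List.pyGetD st.2.2 (i + k) 0 - PySem.List.pyGetD st.2.2 i 0))
        (fun x => x)).getD 0)
      max st.1 (st.2.1 + 2 * w)
  else st.1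

-- ===== PRECONDITION & SPEC =====
-- Pre_ excludes exactly the inputs where Python A raises IndexError: algo shorter than prices.
def Pre_solution (prices : List Int) (algo : List Int) (k : Int) : Prop :=
  prices.length ≤ algo.length
instance (prices : List Int) (algo : List Int) (k : Int) : Decidable (Pre_solution prices algo k) := by unfold Pre_solution; infer_instance
def pvWitness_solution : List Int × List Int × Int := ([3, 1, 4, 2], [0, 1, 0, 1], 2)

def Spec_solution (prices : List Int) (algo : List Int) (k : Int) (out : Int) : Prop := out = solution_alt prices algo k
instance (prices : List Int) (algo : List Int) (k : Int) (out : Int) : Decidable (Spec_solution prices algo k out) := by unfold Spec_solution; infer_instance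

-- ===== CLAIM (what is proved, stated in full; the proofs are below) =====
def Claim_equal_solution : Prop := ∀ (prices : List Int) (algo : List Int) (k : Int), Dom_solution prices algo k → Pre_solution prices algo k → Spec_solution prices algo k (solution prices algo k)

-- ===== LEMMAS AND PROOFS =====

def pvS (c : Nat → Int) (i : Nat) : Int := ((List.range i).map c).sum

theorem pv_pref_char (c : Nat → Int) (n : Nat) :
    (List.range n).foldl (fun acc k => acc ++ [PySem.List.pyGetD acc (-1) 0 + c k]) [0]
      = (List.range (n + 1)).map (pvS c) := by
  induction n with
  | zero => simp [pvS]
  | succ m ih =>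
    rw [List.range_succ, List.foldl_append, ih, List.range_succ (n := m + 1), List.map_append]
    have hsplit : (List.range (m + 1)).map (pvS c)
        = (List.range m).map (pvS c) ++ [pvS c m] := by
      rw [List.range_succ, List.map_append]; rfl
    simp only [List.foldl_cons, List.foldl_nil, hsplit,
      PySem.List.pyGetD_neg_one_append_singleton]
    have : pvS c m + c m = pvS c (m + 1) := by
      simp [pvS, List.range_succ]
    simp [this]

theorem pv_sum_if_lt (c : Nat → Int) (b n : Nat) (hb : b ≤ n) :
    ((List.range n).map (fun j => if j < b then c j else 0)).sum = pvS c b := by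
  induction n with
  | zero => simp [pvS, Nat.le_zero.mp hb]
  | succ m ih =>
    rcases Nat.lt_or_ge m b with h | h
    · have hb' : b = m + 1 := by omega
      subst hb'
      have : ((List.range (m + 1)).map (fun j => if j < m + 1 then c j else 0))
          = (List.range (m + 1)).map c := by
        apply List.map_congr_left
        intro j hj
        simp [List.mem_range.mp hj]
      rw [this, pvS]
    · rw [List.range_succ, List.map_append, List.sum_append]
      simp [Nat.not_lt.mpr h, ih (by omega)]

theorem pv_sum_window (c : Nat → Int) (a b n : Nat) (hab : a ≤ b) (hbn : b ≤ n) :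
    ((List.range n).map (fun j => if a ≤ j ∧ j < b then c j else 0)).sum
      = pvS c b - pvS c a := by
  have h1 : ∀ j, (if a ≤ j ∧ j < b then c j else 0)
      = (if j < b then c j else 0) - (if j < a then c j else 0) := by
    intro j; by_cases h1 : j < a <;> by_cases h2 : j < b <;>
      simp_all <;> omega
  calc ((List.range n).map (fun j => if a ≤ j ∧ j < b then c j else 0)).sum
      = (((List.range n).map (fun j => if j < b then c j else 0)).sum
         - ((List.range n).map (fun j => if j < a then c j else 0)).sum) := by
        simp only [h1]
        induction (List.range n) with
        | nil => simp
        | cons x t iht => simp [iht]; ring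
  _ = pvS c b - pvS c a := by rw [pv_sum_if_lt c b n hbn, pv_sum_if_lt c a n (le_trans hab hbn)]

theorem pv_foldl_max_out (l : List Int) (b z : Int) :
    l.foldl max (max b z) = max b (l.foldl max z) := by
  induction l generalizing z with
  | nil => rfl
  | cons y t ih => simpa [List.foldl_cons, max_assoc] using ih (max z y)

theorem pv_foldl_max_affine (l : List Int) (c a : Int) :
    (l.map (fun x => c + 2 * x)).foldl max (c + 2 * a) = c + 2 * l.foldl max a := by
  induction l generalizing a with
  | nil => rfl
  | cons y t ih =>
    have : max (c + 2 * a) (c + 2 * y) = c + 2 * max a y := by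
      rcases le_total a y with h | h
      · rw [max_eq_right h, max_eq_right (by omega)]
      · rw [max_eq_left h, max_eq_left (by omega)]
    simp [List.foldl_cons, this, ih]

theorem pv_foldl_max_const {α : Type} (l : List α) (h : l ≠ []) (a x : Int) :
    (l.map (fun _ => x)).foldl max a = max a x := by
  induction l generalizing a with
  | nil => exact absurd rfl h
  | cons y t ih =>
    cases t with
    | nil => rfl
    | cons z t' => simpa [List.foldl_cons] using ih (by simp) (max a x)

theorem pv_main (prices algo : List Int) (k : Int) :
    solution prices algo k = solution_alt prices algo k := by
  unfold solution solution_alt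
  simp only [PySem.List.pyRange_zero, Int.toNat_natCast, List.foldl_map, List.map_map,
    PySem.List.pyGetD_natCast, Function.comp_def]
  rw [PySem.List.foldl_prod_mk
    (f := fun (s : Int) y => s + (if algo.getD y 0 ≠ 0 then prices.getD y 0 else -prices.getD y 0))
    (g := fun (s : Int × List Int) y =>
      (s.1 + (if algo.getD y 0 = 1 then prices.getD y 0 else -prices.getD y 0),
       s.2 ++ [PySem.List.pyGetD s.2 (-1) 0 + (if algo.getD y 0 ≠ 1 then prices.getD y 0 else 0)]))]
  rw [PySem.List.foldl_prod_mk
    (f := fun (s : Int) y => s + (if algo.getD y 0 = 1 then prices.getD y 0 else -prices.getD y 0))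
    (g := fun (s : List Int) y =>
      s ++ [PySem.List.pyGetD s (-1) 0 + (if algo.getD y 0 ≠ 1 then prices.getD y 0 else 0)])]
  rw [pv_pref_char (fun y => if algo.getD y 0 ≠ 1 then prices.getD y 0 else 0)]
  have hrev : List.foldl (fun x y => if algo.getD y 0 = 0 then x - prices.getD y 0 else x + prices.getD y 0) 0
      (List.range prices.length)
      = List.foldl (fun s y => s + if algo.getD y 0 ≠ 0 then prices.getD y 0 else -prices.getD y 0) 0
      (List.range prices.length) :=
    PySem.List.foldl_congr_mem _ _ _ _
      (by intro acc x hx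
          by_cases h : algo.getD x 0 = 0 <;>
            simp only [h, ne_eq, not_true_eq_false, not_false_eq_true, if_true, if_false] <;> ring)
  rw [hrev, PySem.List.foldl_append_singleton_eq_map]
  simp only [List.singleton_append]
  rw [PySem.List.max?_id_cons, Option.getD_some]
  by_cases hk0 : k ≤ 0
  · rw [if_pos (le_trans hk0 (Int.natCast_nonneg _)), if_pos hk0]
    have hwin : (fun i : Nat =>
        List.foldl (fun (x : Int) (j : Nat) => if (↑i : Int) ≤ ↑j ∧ (↑j : Int) < ↑i + k ∨ algo.getD j 0 = 1
            then x + prices.getD j 0 else x - prices.getD j 0) 0 (List.range prices.length))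
        = fun _ => List.foldl (fun s y => s + if algo.getD y 0 = 1 then prices.getD y 0
            else -prices.getD y 0) 0 (List.range prices.length) := by
      funext i
      refine PySem.List.foldl_congr_mem _ _ _ _ ?_
      intro acc j hj
      have hno : ¬((↑i : Int) ≤ ↑j ∧ (↑j : Int) < ↑i + k) := by omega
      by_cases h : algo.getD j 0 = 1
      · rw [if_pos (Or.inr h), if_pos h]
      · rw [if_neg (by tauto), if_neg h]; ring
    rw [hwin]
    have hne : List.range ((↑prices.length - k + 1).toNat) ≠ [] := by
      rw [ne_eq, List.range_eq_nil]; omega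
    rw [pv_foldl_max_const _ hne]
  · by_cases hkn : k ≤ (prices.length : Int)
    · rw [if_pos hkn, if_neg hk0]
      obtain ⟨k', rfl⟩ : ∃ k' : Nat, k = (k' : Int) :=
        ⟨k.toNat, (Int.toNat_of_nonneg (by omega)).symm⟩
      have hk'n : k' ≤ prices.length := by exact_mod_cast hkn
      have hm : ((prices.length : Int) - ↑k' + 1).toNat = (prices.length - k') + 1 := by omega
      rw [hm]
      have hA : List.map (fun i : Nat =>
            List.foldl (fun (x : Int) (j : Nat) =>
              if (↑i : Int) ≤ ↑j ∧ (↑j : Int) < ↑i + ↑k' ∨ algo.getD j 0 = 1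
              then x + prices.getD j 0 else x - prices.getD j 0) 0 (List.range prices.length))
          (List.range (prices.length - k' + 1))
          = List.map (fun x =>
              (List.foldl (fun s y => s + if algo.getD y 0 = 1 then prices.getD y 0
                 else -prices.getD y 0) 0 (List.range prices.length)) + 2 * x)
            (List.map (fun i =>
                pvS (fun y => if algo.getD y 0 ≠ 1 then prices.getD y 0 else 0) (i + k')
                - pvS (fun y => if algo.getD y 0 ≠ 1 then prices.getD y 0 else 0) i)
              (List.range (prices.length - k' + 1))) := by
        rw [List.map_map]
        refine List.map_congr_left ?_
        intro i hi
        simp only [Function.comp_apply]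
        have hik : i + k' ≤ prices.length := by have := List.mem_range.mp hi; omega
        have h1 : List.foldl (fun (x : Int) (j : Nat) =>
              if (↑i : Int) ≤ ↑j ∧ (↑j : Int) < ↑i + ↑k' ∨ algo.getD j 0 = 1
              then x + prices.getD j 0 else x - prices.getD j 0) 0 (List.range prices.length)
            = List.foldl (fun (x : Int) (j : Nat) => x +
                ((if algo.getD j 0 = 1 then prices.getD j 0 else -prices.getD j 0)
                 + 2 * (if i ≤ j ∧ j < i + k'
                        then (if algo.getD j 0 ≠ 1 then prices.getD j 0 else 0) else 0)))
              0 (List.range prices.length) := by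
          refine PySem.List.foldl_congr_mem _ _ _ _ ?_
          intro acc j hj
          by_cases hw : i ≤ j ∧ j < i + k'
          · have hwI : (↑i : Int) ≤ (↑j : Int) ∧ (↑j : Int) < ↑i + ↑k' := by
              obtain ⟨hw1, hw2⟩ := hw
              constructor
              · exact_mod_cast hw1
              · exact_mod_cast hw2
            by_cases h : algo.getD j 0 = 1
            · rw [if_pos (Or.inl hwI), if_pos h, if_pos hw, if_neg (not_not_intro h)]; ring
            · rw [if_pos (Or.inl hwI), if_neg h, if_pos hw, if_pos h]; ring
          · have hwI : ¬((↑i : Int) ≤ (↑j : Int) ∧ (↑j : Int) < ↑i + ↑k') := by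
              intro hc; exact hw ⟨by exact_mod_cast hc.1, by exact_mod_cast hc.2⟩
            by_cases h : algo.getD j 0 = 1
            · rw [if_pos (Or.inr h), if_pos h, if_neg hw]; ring
            · rw [if_neg (by tauto), if_neg h, if_neg hw]; ring
        rw [h1, PySem.List.foldl_add, PySem.List.foldl_add]
        rw [← pv_sum_window (fun y => if algo.getD y 0 ≠ 1 then prices.getD y 0 else 0)
              i (i + k') prices.length (by omega) hik]
        have hsplit : ∀ (l : List Nat) (f g : Nat → Int),
            (l.map (fun j => f j + 2 * g j)).sum = (l.map f).sum + 2 * (l.map g).sum := by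
          intro l f g
          induction l with
          | nil => simp
          | cons x t ih => simp [ih]; ring
        rw [hsplit]
        ring
      have hB : List.map (fun x : Nat =>
            PySem.List.pyGetD (List.map (pvS (fun y => if algo.getD y 0 ≠ 1 then prices.getD y 0 else 0))
              (List.range (prices.length + 1))) (↑x + ↑k') 0
            - (List.map (pvS (fun y => if algo.getD y 0 ≠ 1 then prices.getD y 0 else 0))
              (List.range (prices.length + 1))).getD x 0)
          (List.range (prices.length - k' + 1))
          = List.map (fun i =>
                pvS (fun y => if algo.getD y 0 ≠ 1 then prices.getD y 0 else 0) (i + k')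
                - pvS (fun y => if algo.getD y 0 ≠ 1 then prices.getD y 0 else 0) i)
            (List.range (prices.length - k' + 1)) := by
        refine List.map_congr_left ?_
        intro i hi
        have hik : i + k' < prices.length + 1 := by have := List.mem_range.mp hi; omega
        have hcast : ((i : Int) + (k' : Int)) = ((i + k' : Nat) : Int) := by push_cast; ring
        rw [hcast, PySem.List.pyGetD_natCast]
        rw [PySem.List.getD_map_range _ _ _ _ hik, PySem.List.getD_map_range _ _ _ _ (by omega)]
      rw [hA, hB]
      simp only [List.range_succ_eq_map, List.map_cons]
      rw [PySem.List.max?_id_cons, Option.getD_some]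
      simp only [List.foldl_cons]
      rw [pv_foldl_max_out, pv_foldl_max_affine]
    · rw [if_neg hkn]
      have hm0 : (↑prices.length - k + 1).toNat = 0 := by omega
      rw [hm0]
      simp

-- ===== VERDICT (by name: the statement is the Claim_ definition above) =====
theorem solution_spec : Claim_equal_solution := by
  intro prices algo k _ _
  unfold Spec_solution
  exact pv_main prices algo k
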